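-- pv_equiv track=rewrite | github.com/ustc-ivclab/IPM | model_inference.py | get_cand_id_list
-- ===== SOURCE A (Python) =====
-- def RA_recurrent(cur_id, a=0, b=32):
--     if cur_id == a + (b - a) // 2:
--         return a, b
--     elif cur_id < a + (b - a) // 2:
--         return RA_recurrent(cur_id, a=a, b=a + (b - a) // 2)
--     elif cur_id > a + (b - a) // 2:
--         return RA_recurrent(cur_id, a=a + (b - a) // 2, b=b)
--
-- def get_cand_id_list(cur_id, mode='RA', gop_size=32, ref_len=2, frm_num=32):
--     """get candidate reference frame id list"""
--     if mode == 'LDP' or mode == 'LDB':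
--         cand_id_list = set([max(0, (cur_id // gop_size - i) * gop_size) for i in range(4)])
--         tmp_id = max(0, cur_id - 1)
--         while len(cand_id_list) < 4:
--             cand_id_list.add(tmp_id)
--             tmp_id -= 1
--             if tmp_id <= 0:
--                 break
--         cand_id_list = list(cand_id_list)
--         cand_id_list.sort(reverse=True)
--         while len(cand_id_list) < 4:
--             cand_id_list.append(cand_id_list[-1])
--     elif mode == 'RA':
--         base_id, remainder_id = cur_id // 32, cur_id % 32
--         if base_id * 32 + 32 >= frm_num:
--             f0_id, f1_id = RA_recurrent(cur_id=remainder_id, a=0, b=min(32, frm_num - base_id * 32))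
--         else:
--             f0_id, f1_id = RA_recurrent(cur_id=remainder_id, a=0, b=32)
--         cand_id_list = [base_id * 32 + f0_id, base_id * 32 + f0_id if (base_id * 32 + f1_id) >= frm_num else base_id * 32 + f1_id]  # 前向参考列表和后向参考列表的第一个frame id
--     return cand_id_list[:ref_len]
-- ===== SOURCE B (Python) =====
-- def _ins_desc(lst, x):
--     """insert x into a strictly descending list, keeping it sorted and duplicate-free"""
--     i = 0
--     while i < len(lst) and lst[i] > x:
--         i += 1
--     if i == len(lst) or lst[i] != x:
--         lst.insert(i, x)
--
--
-- def get_cand_id_list(cur_id, mode='RA', gop_size=32, ref_len=2, frm_num=32):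
--     """get candidate reference frame id list"""
--     if mode == 'LDP' or mode == 'LDB':
--         # maintain the candidates directly as a sorted (descending) duplicate-free list
--         q = cur_id // gop_size
--         lst = []
--         for i in range(4):
--             _ins_desc(lst, max(0, (q - i) * gop_size))
--         t = max(0, cur_id - 1)
--         while len(lst) < 4:
--             _ins_desc(lst, t)
--             t -= 1
--             if t <= 0:
--                 break
--         lst += [lst[-1]] * (4 - len(lst))
--         return lst[:ref_len]
--     elif mode == 'RA':
--         # iterative binary narrowing instead of recursion
--         base = cur_id // 32 * 32
--         r = cur_id - base
--         a = 0
--         b = min(32, frm_num - base) if base + 32 >= frm_num else 32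
--         while True:
--             mid = a + (b - a) // 2
--             if r < mid:
--                 b = mid
--             elif r > mid:
--                 a = mid
--             else:
--                 break
--         f1 = base + a if base + b >= frm_num else base + b
--         return [base + a, f1][:ref_len]
-- ===== Notes on version B (the rewrite author's own statement) =====
-- stated objective: alternative
-- what changed: The recursive RA_recurrent binary search is replaced by an iterative narrowing loop, and the LDP/LDB set-then-sort-then-append-padding pipeline is replaced by a duplicate-free list kept sorted descending by positional insertion and padded arithmetically with a replicate.
import Mathlib
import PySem

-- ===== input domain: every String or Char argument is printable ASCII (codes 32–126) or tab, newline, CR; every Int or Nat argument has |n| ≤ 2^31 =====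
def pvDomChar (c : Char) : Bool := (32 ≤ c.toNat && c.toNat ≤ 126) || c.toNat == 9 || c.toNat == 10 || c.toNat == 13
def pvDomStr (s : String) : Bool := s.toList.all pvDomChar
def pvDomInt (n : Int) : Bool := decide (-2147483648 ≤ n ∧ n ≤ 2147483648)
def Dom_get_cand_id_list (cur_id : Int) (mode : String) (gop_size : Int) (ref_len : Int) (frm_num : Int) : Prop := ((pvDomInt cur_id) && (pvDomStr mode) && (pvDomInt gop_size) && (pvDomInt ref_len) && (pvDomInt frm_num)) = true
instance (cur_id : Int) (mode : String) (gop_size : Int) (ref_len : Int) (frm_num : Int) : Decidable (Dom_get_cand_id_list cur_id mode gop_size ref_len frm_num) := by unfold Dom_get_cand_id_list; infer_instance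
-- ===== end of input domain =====

-- B replaces A's recursive binary search by an iterative narrowing loop and A's
-- set + sort + append-padding by a directly maintained sorted duplicate-free list
-- with arithmetic padding (objective: alternative decomposition, same cost).
-- Python A raises (ZeroDivisionError / RecursionError / UnboundLocalError) on the
-- inputs excluded by Pre_; both ports return [] there, marked in comments.

-- ===== PORT A =====
-- RA_recurrent with fuel: `none` is exactly where Python hits RecursionError
def RA_recurrent (fuel : Nat) (cur_id : Int) (a : Int) (b : Int) : Option (Int × Int) :=
  match fuel with
  | 0 => none
  | fuel + 1 =>
    if cur_id = a + PySem.Int.floordiv (b - a) 2 then some (a, b)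
    else if cur_id < a + PySem.Int.floordiv (b - a) 2 then
      RA_recurrent fuel cur_id a (a + PySem.Int.floordiv (b - a) 2)
    else
      RA_recurrent fuel cur_id (a + PySem.Int.floordiv (b - a) 2) b

-- A's first while loop: add tmp_id to the set, decrement, break when tmp_id <= 0
def ldpLoopA (s : PySem.Set Int) (tmp_id : Int) : PySem.Set Int :=
  if PySem.Set.len s < 4 then
    let s' := PySem.Set.add s tmp_id
    if tmp_id - 1 ≤ 0 then s' else ldpLoopA s' (tmp_id - 1)
  else s
termination_by tmp_id.toNat
decreasing_by omega

-- A's second while loop: append cand_id_list[-1] until the length is 4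
-- (the list is nonempty whenever this is reached, so the `.getD 0` default is unreachable)
def padA (l : List Int) : List Int :=
  if l.length < 4 then padA (l ++ [(PySem.List.pyGet? l (-1)).getD 0]) else l
termination_by 4 - l.length
decreasing_by simp; omega

def get_cand_id_list (cur_id : Int) (mode : String) (gop_size : Int) (ref_len : Int) (frm_num : Int) : List Int :=
  if mode = "LDP" ∨ mode = "LDB" then
    if gop_size = 0 then []  -- ZeroDivisionError in Python; excluded by Pre_
    else
      let s0 : PySem.Set Int := PySem.Set.ofList ((PySem.List.pyRange 0 4 1).map
        (fun i => max 0 ((PySem.Int.floordiv cur_id gop_size - i) * gop_size)))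
      let s := ldpLoopA s0 (max 0 (cur_id - 1))
      let l := PySem.List.sorted s (fun x => x) true
      PySem.List.slice (padA l) none (some ref_len)
  else if mode = "RA" then
    let base_id := PySem.Int.floordiv cur_id 32
    let remainder_id := PySem.Int.mod cur_id 32
    let res := if base_id * 32 + 32 ≥ frm_num then
        RA_recurrent 100 remainder_id 0 (min 32 (frm_num - base_id * 32))
      else RA_recurrent 100 remainder_id 0 32
    match res with
    | none => []  -- RecursionError in Python; excluded by Pre_
    | some (f0_id, f1_id) =>
      PySem.List.slice [base_id * 32 + f0_id,
        if base_id * 32 + f1_id ≥ frm_num then base_id * 32 + f0_id else base_id * 32 + f1_id]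
        none (some ref_len)
  else []  -- UnboundLocalError in Python; excluded by Pre_

-- ===== PORT B =====
-- insert x into a strictly descending list, keeping it sorted and duplicate-free
def insDesc (lst : List Int) (x : Int) : List Int :=
  match lst with
  | [] => [x]
  | y :: ys => if y > x then y :: insDesc ys x else if y = x then y :: ys else x :: y :: ys

-- B's while loop: same schedule of candidate ids, pushed into the sorted list
def ldpLoopB (lst : List Int) (t : Int) : List Int :=
  if lst.length < 4 then
    let l' := insDesc lst t
    if t - 1 ≤ 0 then l' else ldpLoopB l' (t - 1)
  else lst
termination_by t.toNat
decreasing_by omega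

-- B's iterative binary narrowing; `none` = the Python loop never terminates (excluded by Pre_)
def raLoop (fuel : Nat) (r : Int) (a : Int) (b : Int) : Option (Int × Int) :=
  match fuel with
  | 0 => none
  | fuel + 1 =>
    let mid := a + PySem.Int.floordiv (b - a) 2
    if r < mid then raLoop fuel r a mid
    else if mid < r then raLoop fuel r mid b
    else some (a, b)

def get_cand_id_list_alt (cur_id : Int) (mode : String) (gop_size : Int) (ref_len : Int) (frm_num : Int) : List Int :=
  if mode = "LDP" ∨ mode = "LDB" then
    if gop_size = 0 then []  -- ZeroDivisionError in Python; excluded by Pre_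
    else
      let q := PySem.Int.floordiv cur_id gop_size
      let lst0 := (PySem.List.pyRange 0 4 1).foldl (fun l i => insDesc l (max 0 ((q - i) * gop_size))) []
      let lst := ldpLoopB lst0 (max 0 (cur_id - 1))
      let lst2 := lst ++ List.replicate (4 - lst.length) ((PySem.List.pyGet? lst (-1)).getD 0)
      PySem.List.slice lst2 none (some ref_len)
  else if mode = "RA" then
    let base := PySem.Int.floordiv cur_id 32 * 32
    let r := cur_id - base
    let b0 := if base + 32 ≥ frm_num then min 32 (frm_num - base) else 32
    match raLoop 100 r 0 b0 with
    | none => []  -- the Python loop never terminates there; excluded by Pre_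
    | some (a, b) =>
      PySem.List.slice [base + a, if base + b ≥ frm_num then base + a else base + b] none (some ref_len)
  else []  -- no branch assigns cand_id_list in Python; excluded by Pre_

-- ===== PRECONDITION & SPEC =====
-- Pre_ = exactly the inputs where Python A returns: LDP/LDB needs gop_size ≠ 0
-- (else ZeroDivisionError), RA needs the binary search to terminate, i.e.
-- cur_id < frm_num or the corner cur_id = frm_num with cur_id % 32 == 0
-- (else RecursionError); any other mode leaves cand_id_list unbound.
def Pre_get_cand_id_list (cur_id : Int) (mode : String) (gop_size : Int) (ref_len : Int) (frm_num : Int) : Prop :=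
  ((mode = "LDP" ∨ mode = "LDB") ∧ gop_size ≠ 0) ∨
  (mode = "RA" ∧ (cur_id < frm_num ∨ (cur_id = frm_num ∧ PySem.Int.mod cur_id 32 = 0)))
instance (cur_id : Int) (mode : String) (gop_size : Int) (ref_len : Int) (frm_num : Int) : Decidable (Pre_get_cand_id_list cur_id mode gop_size ref_len frm_num) := by unfold Pre_get_cand_id_list; infer_instance

def pvWitness_get_cand_id_list : Int × String × Int × Int × Int := (5, "RA", 32, 2, 32)

def Spec_get_cand_id_list (cur_id : Int) (mode : String) (gop_size : Int) (ref_len : Int) (frm_num : Int) (out : List Int) : Prop := out = get_cand_id_list_alt cur_id mode gop_size ref_len frm_num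
instance (cur_id : Int) (mode : String) (gop_size : Int) (ref_len : Int) (frm_num : Int) (out : List Int) : Decidable (Spec_get_cand_id_list cur_id mode gop_size ref_len frm_num out) := by unfold Spec_get_cand_id_list; infer_instance

-- ===== CLAIM (what is proved, stated in full; the proofs are below) =====
def Claim_equal_get_cand_id_list : Prop := ∀ (cur_id : Int) (mode : String) (gop_size : Int) (ref_len : Int) (frm_num : Int), Dom_get_cand_id_list cur_id mode gop_size ref_len frm_num → Pre_get_cand_id_list cur_id mode gop_size ref_len frm_num → Spec_get_cand_id_list cur_id mode gop_size ref_len frm_num (get_cand_id_list cur_id mode gop_size ref_len frm_num)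

-- ===== LEMMAS AND PROOFS =====

theorem raLoop_eq (fuel : Nat) : ∀ (r a b : Int), raLoop fuel r a b = RA_recurrent fuel r a b := by
  induction fuel with
  | zero => intro r a b; rfl
  | succ n ih =>
    intro r a b
    simp only [raLoop, RA_recurrent]
    split_ifs with h1 h2 h3 h4 <;> first | rfl | (apply ih) | omega

theorem mem_insDesc (l : List Int) (x z : Int) : z ∈ insDesc l x ↔ z = x ∨ z ∈ l := by
  induction l with
  | nil => simp [insDesc]
  | cons y ys ih =>
    simp only [insDesc]
    split_ifs with h1 h2
    · simp [List.mem_cons, ih]; tauto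
    · subst h2; simp [List.mem_cons]
    · simp [List.mem_cons]

theorem insDesc_pairwise (l : List Int) (x : Int) (h : l.Pairwise (· > ·)) :
    (insDesc l x).Pairwise (· > ·) := by
  induction l with
  | nil => simp [insDesc]
  | cons y ys ih =>
    rw [List.pairwise_cons] at h
    obtain ⟨hy, hys⟩ := h
    simp only [insDesc]
    split_ifs with h1 h2
    · rw [List.pairwise_cons]
      refine ⟨?_, ih hys⟩
      intro z hz
      rcases (mem_insDesc ys x z).mp hz with rfl | hz
      · exact h1
      · exact hy z hz
    · rw [List.pairwise_cons]; exact ⟨hy, hys⟩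
    · rw [List.pairwise_cons]
      refine ⟨?_, by rw [List.pairwise_cons]; exact ⟨hy, hys⟩⟩
      intro z hz
      rcases List.mem_cons.mp hz with rfl | hz
      · omega
      · have := hy z hz; omega

theorem insDesc_of_mem (l : List Int) (x : Int) (h : l.Pairwise (· > ·)) (hx : x ∈ l) :
    insDesc l x = l := by
  induction l with
  | nil => simp at hx
  | cons y ys ih =>
    rw [List.pairwise_cons] at h
    obtain ⟨hy, hys⟩ := h
    simp only [insDesc]
    split_ifs with h1 h2
    · rcases List.mem_cons.mp hx with rfl | hx
      · omega
      · rw [ih hys hx]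
    · rfl
    · rcases List.mem_cons.mp hx with rfl | hx
      · omega
      · have := hy x hx; omega

theorem insDesc_perm_cons (l : List Int) (x : Int) (hx : x ∉ l) :
    (insDesc l x).Perm (x :: l) := by
  induction l with
  | nil => simp [insDesc]
  | cons y ys ih =>
    simp only [insDesc]
    split_ifs with h1 h2
    · have hx' : x ∉ ys := fun h => hx (List.mem_cons_of_mem y h)
      exact ((ih hx').cons y).trans (List.Perm.swap x y ys)
    · exact absurd (by simp [h2]) hx
    · exact List.Perm.refl _

-- the invariant tying B's list to A's set
def LInv (l : List Int) (s : PySem.Set Int) : Prop := l.Perm s ∧ l.Pairwise (· > ·)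

theorem set_add_eq (s : PySem.Set Int) (x : Int) :
    PySem.Set.add s x = if x ∈ s then s else s ++ [x] := by
  simp [PySem.Set.add, PySem.Set.contains]

theorem inv_add (l : List Int) (s : PySem.Set Int) (x : Int) (h : LInv l s) :
    LInv (insDesc l x) (PySem.Set.add s x) := by
  obtain ⟨hp, hd⟩ := h
  rw [set_add_eq]
  by_cases hx : x ∈ s
  · have hxl : x ∈ l := hp.mem_iff.mpr hx
    rw [insDesc_of_mem l x hd hxl]
    simp [hx, LInv, hp, hd]
  · have hxl : x ∉ l := fun h => hx (hp.mem_iff.mp h)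
    simp only [hx, ite_false]
    exact ⟨(insDesc_perm_cons l x hxl).trans
      ((hp.cons x).trans (List.perm_append_singleton x s).symm),
      insDesc_pairwise l x hd⟩

theorem inv_foldl (f : Int → Int) (xs : List Int) :
    ∀ (l : List Int) (s : PySem.Set Int), LInv l s →
    LInv (xs.foldl (fun l i => insDesc l (f i)) l)
        (xs.foldl (fun s i => PySem.Set.add s (f i)) s) := by
  induction xs with
  | nil => intro l s h; exact h
  | cons x xs ih =>
    intro l s h
    exact ih _ _ (inv_add l s (f x) h)

theorem set_len_eq (s : PySem.Set Int) : PySem.Set.len s = (s.length : Int) := by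
  simp [PySem.Set.len]

theorem inv_loop : ∀ (n : Nat) (t : Int), t.toNat ≤ n → ∀ (l : List Int) (s : PySem.Set Int),
    LInv l s → LInv (ldpLoopB l t) (ldpLoopA s t) := by
  intro n
  induction n with
  | zero =>
    intro t ht l s h
    unfold ldpLoopB ldpLoopA
    have hlen : l.length = s.length := h.1.length_eq
    rw [set_len_eq]
    split_ifs with h1 h2 <;>
      first
      | exact inv_add l s t h
      | omega
      | exact h
  | succ n ih =>
    intro t ht l s h
    unfold ldpLoopB ldpLoopA
    have hlen : l.length = s.length := h.1.length_eq
    rw [set_len_eq]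
    split_ifs with h1 h2 <;>
      first
      | exact inv_add l s t h
      | exact ih (t - 1) (by omega) _ _ (inv_add l s t h)
      | omega
      | exact h

theorem padA_eq : ∀ (n : Nat) (l : List Int), 4 - l.length ≤ n →
    padA l = l ++ List.replicate (4 - l.length) ((PySem.List.pyGet? l (-1)).getD 0) := by
  intro n
  induction n with
  | zero =>
    intro l hl
    unfold padA
    have : ¬ l.length < 4 := by omega
    simp [this, show 4 - l.length = 0 by omega]
  | succ n ih =>
    intro l hl
    unfold padA
    by_cases h : l.length < 4
    · simp only [h, if_true]
      set d := (PySem.List.pyGet? l (-1)).getD 0 with hd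
      rw [ih (l ++ [d]) (by simp; omega)]
      rw [PySem.List.pyGet?_neg_one_append_singleton]
      simp only [List.length_append, List.length_cons, List.length_nil, Option.getD_some]
      rw [List.append_assoc]
      congr 1
      have h4 : 4 - l.length = (4 - (l.length + 1)) + 1 := by omega
      rw [h4, List.replicate_succ]
      rfl
    · simp [h, show 4 - l.length = 0 by omega]

-- ===== VERDICT (by name: the statement is the Claim_ definition above) =====
theorem get_cand_id_list_spec : Claim_equal_get_cand_id_list := by
  intro cur_id mode gop_size ref_len frm_num _ _
  unfold Spec_get_cand_id_list get_cand_id_list get_cand_id_list_alt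
  by_cases hm : mode = "LDP" ∨ mode = "LDB"
  · simp only [hm, if_true]
    by_cases hg : gop_size = 0
    · simp [hg]
    · simp only [hg, ite_false]
      -- the LDP/LDB branch: B's list is A's set, sorted descending
      set f := fun i => max 0 ((PySem.Int.floordiv cur_id gop_size - i) * gop_size) with hf
      have h0 : LInv ((PySem.List.pyRange 0 4 1).foldl (fun l i => insDesc l (f i)) [])
          (PySem.Set.ofList ((PySem.List.pyRange 0 4 1).map f)) := by
        rw [PySem.Set.ofList_eq_foldl, List.foldl_map]
        exact inv_foldl f _ [] [] ⟨List.Perm.refl _, List.Pairwise.nil⟩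
      have hinv := inv_loop (max 0 (cur_id - 1)).toNat (max 0 (cur_id - 1)) le_rfl _ _ h0
      have hsort := PySem.List.sorted_rev_eq_of_perm_of_pairwise_gt
        (ldpLoopA (PySem.Set.ofList ((PySem.List.pyRange 0 4 1).map f)) (max 0 (cur_id - 1)))
        (ldpLoopB ((PySem.List.pyRange 0 4 1).foldl (fun l i => insDesc l (f i)) []) (max 0 (cur_id - 1)))
        (fun x => x) hinv.1 hinv.2
      rw [hsort, padA_eq 4 _ (by omega)]
  · simp only [hm, ite_false]
    by_cases hr : mode = "RA"
    · simp only [hr, if_true]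
      have hbase : PySem.Int.mod cur_id 32 = cur_id - PySem.Int.floordiv cur_id 32 * 32 := by
        have := PySem.Int.floordiv_mul_add_mod cur_id 32
        omega
      rw [hbase]
      rw [show (if PySem.Int.floordiv cur_id 32 * 32 + 32 ≥ frm_num then
            RA_recurrent 100 (cur_id - PySem.Int.floordiv cur_id 32 * 32) 0 (min 32 (frm_num - PySem.Int.floordiv cur_id 32 * 32))
          else RA_recurrent 100 (cur_id - PySem.Int.floordiv cur_id 32 * 32) 0 32)
          = RA_recurrent 100 (cur_id - PySem.Int.floordiv cur_id 32 * 32) 0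
              (if PySem.Int.floordiv cur_id 32 * 32 + 32 ≥ frm_num then min 32 (frm_num - PySem.Int.floordiv cur_id 32 * 32) else 32)
          from by split_ifs <;> rfl]
      rw [raLoop_eq]
    · simp [hr]
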